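-- pv_equiv track=rewrite | github.com/cnm13ryan/inoculation-prompting | gcd_sycophancy/shared/utils.py | sanezip
-- ===== SOURCE A (Python) =====
-- def sanezip(x, y):
--     """
--     Zip, but it errors if the iterators have different lengths.
--     """
--     iter1 = iter(x)
--     iter2 = iter(y)
--     while True:
--         past_iter_1 = False
--         try:
--             iter1_next = next(iter1)
--             past_iter_1 = True
--             iter2_next = next(iter2)
--
--             yield iter1_next, iter2_next
--         except StopIteration:
--             if past_iter_1:
--                 # stopped on 2, but not on 1
--                 raise ValueError("Iterables have different lengths")
--             else:
--                 try:
--                     # stopped on 1, but not on 2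
--                     next(iter2)
--                     raise ValueError("Iterables have different lengths")
--                 except StopIteration:
--                     return
-- ===== SOURCE B (Python) =====
-- import itertools
--
-- def sanezip(x, y):
--     """
--     Zip, but it errors if the iterators have different lengths.
--     """
--     sentinel = object()
--     for a, b in itertools.zip_longest(x, y, fillvalue=sentinel):
--         if a is sentinel or b is sentinel:
--             raise ValueError("Iterables have different lengths")
--         yield a, b
-- ===== Notes on version B (the rewrite author's own statement) =====
-- stated objective: idiomatic
-- what changed: Replaces the manual next()/past_iter_1/StopIteration bookkeeping with itertools.zip_longest over a fresh object() sentinel, raising on the first padded pair.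
import Mathlib
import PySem

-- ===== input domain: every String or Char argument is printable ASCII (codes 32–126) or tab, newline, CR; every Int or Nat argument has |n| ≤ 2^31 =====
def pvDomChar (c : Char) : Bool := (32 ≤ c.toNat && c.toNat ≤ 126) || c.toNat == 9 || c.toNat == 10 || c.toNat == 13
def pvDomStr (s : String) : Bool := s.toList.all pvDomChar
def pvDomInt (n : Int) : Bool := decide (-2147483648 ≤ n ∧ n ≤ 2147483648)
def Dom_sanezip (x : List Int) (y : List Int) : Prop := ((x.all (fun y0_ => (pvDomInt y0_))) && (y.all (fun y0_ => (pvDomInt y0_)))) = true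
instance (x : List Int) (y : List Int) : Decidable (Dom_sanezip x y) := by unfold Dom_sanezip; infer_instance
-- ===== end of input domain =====

-- B zips with itertools.zip_longest over a fresh sentinel instead of manual next()/StopIteration bookkeeping (idiomatic); both raise ValueError on length mismatch, excluded by Pre_.


-- ===== PORT A =====
-- A's while-loop: take the next element of each iterator in turn, stop/raise when one ends.
-- On mismatched lengths A raises ValueError (excluded by Pre_); the port returns the pairs yielded so far.
def sanezip (x : List Int) (y : List Int) : List (Int × Int) :=
  match x, y with
  | a :: as_, b :: bs => (a, b) :: sanezip as_ bs
  | _, _ => []   -- StopIteration path: return (equal lengths) or raise ValueError (outside Pre_)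

-- ===== PORT B =====
-- B-side helper: itertools.zip_longest with fillvalue = sentinel (none = the sentinel).
def zipLongestOpt (x : List Int) (y : List Int) : List (Option Int × Option Int) :=
  match x with
  | [] =>
    match y with
    | [] => []
    | b :: bs => (none, some b) :: zipLongestOpt [] bs
  | a :: as_ =>
    match y with
    | [] => (some a, none) :: zipLongestOpt as_ []
    | b :: bs => (some a, some b) :: zipLongestOpt as_ bs

-- B's loop body: yield real pairs, raise ValueError at the first sentinel (outside Pre_).
def emitPairs (l : List (Option Int × Option Int)) : List (Int × Int) :=
  match l with
  | [] => []   -- end of zip_longest: return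
  | (a?, b?) :: rest =>
    match a?, b? with
    | some a, some b => (a, b) :: emitPairs rest
    | _, _ => []   -- sentinel reached: raise ValueError (outside Pre_)

def sanezip_alt (x : List Int) (y : List Int) : List (Int × Int) :=
  emitPairs (zipLongestOpt x y)

-- ===== PRECONDITION & SPEC =====
-- Pre_ excludes mismatched lengths, on which both A and B raise ValueError("Iterables have different lengths").
def Pre_sanezip (x : List Int) (y : List Int) : Prop := x.length = y.length
instance (x : List Int) (y : List Int) : Decidable (Pre_sanezip x y) := by unfold Pre_sanezip; infer_instance
def pvWitness_sanezip : List Int × List Int := ([1, 2, 3], [4, 5, 6])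

def Spec_sanezip (x : List Int) (y : List Int) (out : List (Int × Int)) : Prop := out = sanezip_alt x y
instance (x : List Int) (y : List Int) (out : List (Int × Int)) : Decidable (Spec_sanezip x y out) := by unfold Spec_sanezip; infer_instance

-- ===== CLAIM (what is proved, stated in full; the proofs are below) =====
def Claim_equal_sanezip : Prop := ∀ (x : List Int) (y : List Int), Dom_sanezip x y → Pre_sanezip x y → Spec_sanezip x y (sanezip x y)

-- ===== LEMMAS AND PROOFS =====
theorem sanezip_eq_alt : ∀ (x y : List Int), x.length = y.length → sanezip x y = sanezip_alt x y := by
  intro x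
  induction x with
  | nil => intro y h; cases y with
    | nil => simp [sanezip, sanezip_alt, zipLongestOpt, emitPairs]
    | cons b bs => simp at h
  | cons a as_ ih =>
    intro y h
    cases y with
    | nil => simp at h
    | cons b bs =>
      simp only [List.length_cons, Nat.add_right_cancel_iff] at h
      simp only [sanezip, sanezip_alt, zipLongestOpt, emitPairs]
      have := ih bs h
      simpa [sanezip_alt] using this

-- ===== VERDICT (by name: the statement is the Claim_ definition above) =====
theorem sanezip_spec : Claim_equal_sanezip := by
  intro x y _ hpre
  exact sanezip_eq_alt x y hpre
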